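-- pv_equiv track=rewrite | github.com/Captainmorgan37/CYYZ-CYUL-Stays | CYYZ CYUL Stays.py | classify_aircraft_type
-- ===== SOURCE A (Python) =====
-- EMBRAER_PREFIXES = ("E54", "E55")
--
-- CJ_PREFIXES = ("C25",)
--
-- def classify_aircraft_type(type_code: str) -> str:
--     """Classify the aircraft type into embraer/cj/other/unknown buckets."""
--     code = (type_code or "").strip().upper()
--     if not code:
--         return "unknown"
--     if any(code.startswith(prefix) for prefix in EMBRAER_PREFIXES):
--         return "embraer"
--     if any(code.startswith(prefix) for prefix in CJ_PREFIXES):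
--         return "cj"
--     return "other"
-- ===== SOURCE B (Python) =====
-- # Character-level trie walk over a flat node table instead of prefix scans.
-- # Nodes: an int-valued dict = internal node (edges by character), a str = bucket leaf.
-- TRIE = [
--     {"E": 1, "C": 2},      # 0: root
--     {"5": 3},              # 1: "E"
--     {"2": 4},              # 2: "C"
--     {"4": 5, "5": 6},      # 3: "E5"
--     {"5": 7},              # 4: "C2"
--     "embraer",             # 5: "E54"
--     "embraer",             # 6: "E55"
--     "cj",                  # 7: "C25"
-- ]
--
--
-- def classify_aircraft_type(type_code: str) -> str:
--     """Classify the aircraft type into embraer/cj/other/unknown buckets."""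
--     code = (type_code or "").strip().upper()
--     if not code:
--         return "unknown"
--     node = 0
--     for ch in code:
--         entry = TRIE[node]
--         if isinstance(entry, str):
--             return entry
--         nxt = entry.get(ch)
--         if nxt is None:
--             return "other"
--         node = nxt
--     entry = TRIE[node]
--     return entry if isinstance(entry, str) else "other"
-- ===== Notes on version B (the rewrite author's own statement) =====
-- stated objective: alternative
-- what changed: Replaces the two any(startswith) scans over prefix tuples with a character-by-character walk of a flat trie node table (dict edges per node, string leaves), consuming the code one character at a time.
import Mathlib
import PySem

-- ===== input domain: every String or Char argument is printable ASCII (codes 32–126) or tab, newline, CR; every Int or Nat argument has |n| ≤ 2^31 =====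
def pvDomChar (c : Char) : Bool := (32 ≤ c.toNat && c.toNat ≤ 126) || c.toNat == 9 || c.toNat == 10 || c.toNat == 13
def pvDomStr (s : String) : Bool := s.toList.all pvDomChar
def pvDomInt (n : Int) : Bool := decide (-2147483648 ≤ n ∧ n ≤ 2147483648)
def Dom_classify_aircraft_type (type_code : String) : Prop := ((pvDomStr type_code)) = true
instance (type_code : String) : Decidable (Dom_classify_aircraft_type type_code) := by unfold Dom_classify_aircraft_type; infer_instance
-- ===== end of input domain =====

-- B walks a character-level trie (flat node table) instead of scanning startswith over prefix tuples (alternative algorithm).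


-- ===== PORT A =====
def EMBRAER_PREFIXES : List String := ["E54", "E55"]
def CJ_PREFIXES : List String := ["C25"]

def classify_aircraft_type (type_code : String) : String :=
  -- (type_code or "") is type_code when non-empty, "" otherwise
  let code := PySem.Str.upper (PySem.Str.strip (if type_code = "" then "" else type_code))
  if code = "" then "unknown"
  else if EMBRAER_PREFIXES.any (fun prefix_ => PySem.Str.startswith code prefix_) then "embraer"
  else if CJ_PREFIXES.any (fun prefix_ => PySem.Str.startswith code prefix_) then "cj"
  else "other"

-- ===== PORT B =====
-- flat trie table: Sum.inl d = internal node with edge dict, Sum.inr s = bucket leaf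
def TRIE : List (PySem.Dict Char Nat ⊕ String) :=
  [Sum.inl (PySem.Dict.ofList [('E', 1), ('C', 2)]),
   Sum.inl (PySem.Dict.ofList [('5', 3)]),
   Sum.inl (PySem.Dict.ofList [('2', 4)]),
   Sum.inl (PySem.Dict.ofList [('4', 5), ('5', 6)]),
   Sum.inl (PySem.Dict.ofList [('5', 7)]),
   Sum.inr "embraer",
   Sum.inr "embraer",
   Sum.inr "cj"]

-- the for-loop of Source B; TRIE[node] is always in range in Source B (node comes from the table),
-- so the getD default is unreachable and the indexing is exact
def trieWalk (node : Nat) : List Char → String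
  | [] =>
      match TRIE.getD node (Sum.inr "other") with
      | Sum.inr s => s
      | Sum.inl _ => "other"
  | ch :: rest =>
      match TRIE.getD node (Sum.inr "other") with
      | Sum.inr s => s
      | Sum.inl d =>
          match d.get? ch with
          | none => "other"
          | some nxt => trieWalk nxt rest

def classify_aircraft_type_alt (type_code : String) : String :=
  let code := PySem.Str.upper (PySem.Str.strip (if type_code = "" then "" else type_code))
  if code = "" then "unknown"
  else trieWalk 0 code.toList

-- ===== PRECONDITION & SPEC =====
def Spec_classify_aircraft_type (type_code : String) (out : String) : Prop := out = classify_aircraft_type_alt type_code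
instance (type_code : String) (out : String) : Decidable (Spec_classify_aircraft_type type_code out) := by unfold Spec_classify_aircraft_type; infer_instance

-- ===== CLAIM (what is proved, stated in full; the proofs are below) =====
def Claim_equal_classify_aircraft_type : Prop := ∀ (type_code : String), Dom_classify_aircraft_type type_code → Spec_classify_aircraft_type type_code (classify_aircraft_type type_code)

-- ===== LEMMAS AND PROOFS =====

-- startswith by a length-3 prefix is equality of the first three characters
theorem startswith_len3 (l p : List Char) (hp : p.length = 3) :
    PySem.Chars.startswith l p = decide (l.take 3 = p) := by
  rw [Bool.eq_iff_iff]
  simp only [PySem.Chars.startswith_iff, decide_eq_true_eq, List.prefix_iff_eq_take, hp]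
  exact eq_comm

-- a leaf node returns its bucket regardless of the remaining characters
theorem trieWalk_leaf (n : Nat) (s : String) (h : TRIE[n]? = some (Sum.inr s)) :
    ∀ r, trieWalk n r = s := by
  intro r; cases r <;> simp [trieWalk, List.getD, h]

-- the trie walk from the root computes the prefix classification
theorem trieWalk_root (l : List Char) :
    trieWalk 0 l =
      if l.take 3 = ['E', '5', '4'] then "embraer"
      else if l.take 3 = ['E', '5', '5'] then "embraer"
      else if l.take 3 = ['C', '2', '5'] then "cj"
      else "other" := by
  have w5 : ∀ r, trieWalk 5 r = "embraer" := trieWalk_leaf 5 _ (by decide)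
  have w6 : ∀ r, trieWalk 6 r = "embraer" := trieWalk_leaf 6 _ (by decide)
  have w7 : ∀ r, trieWalk 7 r = "cj" := trieWalk_leaf 7 _ (by decide)
  have hmk0 : PySem.Dict.ofList [('E', (1 : Nat)), ('C', 2)] = PySem.Dict.mk [('E', 1), ('C', 2)] := by decide
  have hmk1 : PySem.Dict.ofList [('5', (3 : Nat))] = PySem.Dict.mk [('5', 3)] := by decide
  have hmk2 : PySem.Dict.ofList [('2', (4 : Nat))] = PySem.Dict.mk [('2', 4)] := by decide
  have hmk3 : PySem.Dict.ofList [('4', (5 : Nat)), ('5', 6)] = PySem.Dict.mk [('4', 5), ('5', 6)] := by decide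
  have hmk4 : PySem.Dict.ofList [('5', (7 : Nat))] = PySem.Dict.mk [('5', 7)] := by decide
  rcases l with _ | ⟨c1, _ | ⟨c2, _ | ⟨c3, rest⟩⟩⟩
  · simp [trieWalk, TRIE]
  · by_cases h1 : 'E' = c1 <;> by_cases h2 : 'C' = c1 <;> subst_vars <;>
      simp_all [trieWalk, TRIE, hmk0, hmk1, hmk2, PySem.Dict.get?_mk_cons, PySem.Dict.get?, List.find?_cons]
  · by_cases h1 : 'E' = c1 <;> by_cases h2 : 'C' = c1 <;>
      by_cases h3 : '5' = c2 <;> by_cases h4 : '2' = c2 <;> subst_vars <;>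
      simp_all [trieWalk, TRIE, hmk0, hmk1, hmk2, hmk3, hmk4, PySem.Dict.get?_mk_cons,
        PySem.Dict.get?, List.find?_cons]
  · by_cases h1 : 'E' = c1 <;> by_cases h2 : 'C' = c1 <;>
      by_cases h3 : '5' = c2 <;> by_cases h4 : '2' = c2 <;>
      by_cases h5 : '4' = c3 <;> by_cases h6 : '5' = c3 <;> subst_vars <;>
      simp_all [trieWalk, TRIE, hmk0, hmk1, hmk2, hmk3, hmk4, PySem.Dict.get?_mk_cons,
        PySem.Dict.get?, List.find?_cons, w5, w6, w7] <;>
      simp_all [eq_comm]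

-- ===== VERDICT (by name: the statement is the Claim_ definition above) =====
theorem classify_aircraft_type_spec : Claim_equal_classify_aircraft_type := by
  intro type_code _
  unfold Spec_classify_aircraft_type classify_aircraft_type classify_aircraft_type_alt
  set code := PySem.Str.upper (PySem.Str.strip (if type_code = "" then "" else type_code)) with hcode
  by_cases h : code = ""
  · simp [h]
  · simp only [h, if_false, EMBRAER_PREFIXES, CJ_PREFIXES, List.any_cons, List.any_nil,
      Bool.or_false, PySem.Str.startswith_eq]
    rw [startswith_len3 _ _ (by decide), startswith_len3 _ _ (by decide),
      startswith_len3 _ _ (by decide), trieWalk_root]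
    generalize code.toList.take 3 = t
    by_cases h1 : t = ['E', '5', '4'] <;> by_cases h2 : t = ['E', '5', '5'] <;>
      by_cases h3 : t = ['C', '2', '5'] <;> simp [h1, h2, h3]
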